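-- pv_equiv track=rewrite | github.com/Rounakag16/EquiDecide | backend/core/llm_explainer.py | stream_explanation_words
-- ===== SOURCE A (Python) =====
-- from typing import Any, Dict, Generator, List, Tuple
--
-- def stream_explanation_words(text: str, max_words_per_chunk: int = 8) -> Generator[str, None, None]:
--     """
--     Streams the explanation in small word-based chunks.
--     This works for both LLM and fallback modes (keeps UX streaming without SDK dependency).
--     """
--     words = (text or "").split(" ")
--     chunk: List[str] = []
--     for w in words:
--         if not w:
--             continue
--         chunk.append(w)
--         if len(chunk) >= max_words_per_chunk:
--             yield " ".join(chunk) + " "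
--             chunk = []
--     if chunk:
--         yield " ".join(chunk)
-- ===== SOURCE B (Python) =====
-- from typing import Generator, List
--
-- def stream_explanation_words(text: str, max_words_per_chunk: int = 8) -> Generator[str, None, None]:
--     """Same chunking, as a slicing pass over the precomputed word list."""
--     words: List[str] = [w for w in (text or "").split(" ") if w]
--     step = max(max_words_per_chunk, 1)
--     while words:
--         group, words = words[:step], words[step:]
--         yield " ".join(group) + (" " if len(group) >= max_words_per_chunk else "")
-- ===== Notes on version B (the rewrite author's own statement) =====
-- stated objective: simpler
-- what changed: B precomputes the filtered word list and emits it in index slices of step max(k,1) (trailing space iff the slice is full), replacing A's running chunk accumulator and per-word flush branch.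
import Mathlib
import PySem

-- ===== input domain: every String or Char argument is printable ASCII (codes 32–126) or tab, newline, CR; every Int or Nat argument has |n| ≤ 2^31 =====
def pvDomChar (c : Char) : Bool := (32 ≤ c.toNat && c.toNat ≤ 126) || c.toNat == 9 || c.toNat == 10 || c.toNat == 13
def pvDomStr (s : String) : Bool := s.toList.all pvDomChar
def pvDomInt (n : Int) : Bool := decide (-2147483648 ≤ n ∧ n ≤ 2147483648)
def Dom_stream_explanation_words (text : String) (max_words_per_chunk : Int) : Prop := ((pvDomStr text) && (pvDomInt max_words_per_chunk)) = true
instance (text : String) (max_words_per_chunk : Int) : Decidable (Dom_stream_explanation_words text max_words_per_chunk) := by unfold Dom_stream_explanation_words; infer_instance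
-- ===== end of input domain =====

-- B drops A's running accumulator and per-word flush branch in favour of slicing a precomputed
-- filtered word list; same output on every input (objective: simpler).

-- ===== PORT A =====
-- the for-loop over words, carrying the running `chunk`; yields collected in order
def pvLoopA (k : Int) : List String → List String → List String
  | [], chunk => if chunk = [] then [] else [PySem.Str.join " " chunk]
  | w :: ws, chunk =>
      if w = "" then pvLoopA k ws chunk
      else
        let c := chunk ++ [w]
        if (c.length : Int) ≥ k then (PySem.Str.join " " c ++ " ") :: pvLoopA k ws []
        else pvLoopA k ws c

def stream_explanation_words (text : String) (max_words_per_chunk : Int) : List String :=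
  let words := (PySem.Str.split? (if text = "" then "" else text) " ").getD []
  pvLoopA max_words_per_chunk words []

-- ===== PORT B =====
-- the while-loop: slice off words[:step] / words[step:]; `(w :: rest).take stepN` is words[:step]
-- and `rest.drop (stepN - 1)` is words[step:] (stepN ≥ 1 at every call site)
def pvLoopB (k : Int) (stepN : Nat) : List String → List String
  | [] => []
  | w :: rest =>
      let g := (w :: rest).take stepN
      (if (g.length : Int) ≥ k then PySem.Str.join " " g ++ " " else PySem.Str.join " " g)
        :: pvLoopB k stepN (rest.drop (stepN - 1))
  termination_by ws => ws.length
  decreasing_by simp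

def stream_explanation_words_alt (text : String) (max_words_per_chunk : Int) : List String :=
  let words := ((PySem.Str.split? (if text = "" then "" else text) " ").getD []).filter (fun w => w != "")
  pvLoopB max_words_per_chunk (max max_words_per_chunk 1).toNat words

-- ===== PRECONDITION & SPEC =====
def Spec_stream_explanation_words (text : String) (max_words_per_chunk : Int) (out : List String) : Prop := out = stream_explanation_words_alt text max_words_per_chunk
instance (text : String) (max_words_per_chunk : Int) (out : List String) : Decidable (Spec_stream_explanation_words text max_words_per_chunk out) := by unfold Spec_stream_explanation_words; infer_instance

-- ===== CLAIM (what is proved, stated in full; the proofs are below) =====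
def Claim_equal_stream_explanation_words : Prop := ∀ (text : String) (max_words_per_chunk : Int), Dom_stream_explanation_words text max_words_per_chunk → Spec_stream_explanation_words text max_words_per_chunk (stream_explanation_words text max_words_per_chunk)

-- ===== LEMMAS AND PROOFS =====

lemma pvLoopB_nil (k : Int) (s : Nat) : pvLoopB k s [] = [] := by rw [pvLoopB.eq_def]

lemma pvLoopB_cons (k : Int) (s : Nat) (w : String) (rest : List String) :
    pvLoopB k s (w :: rest) =
      (if (((w :: rest).take s).length : Int) ≥ k
        then PySem.Str.join " " ((w :: rest).take s) ++ " "
        else PySem.Str.join " " ((w :: rest).take s))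
        :: pvLoopB k s (rest.drop (s - 1)) := by
  rw [pvLoopB.eq_def]

-- A's loop ignores empty words: it equals itself on the filtered list
lemma pvLoopA_filter (k : Int) (ws : List String) :
    ∀ chunk, pvLoopA k ws chunk = pvLoopA k (ws.filter (fun w => w != "")) chunk := by
  induction ws with
  | nil => intro chunk; rfl
  | cons w ws ih =>
      intro chunk
      by_cases hw : w = ""
      · simp [pvLoopA, hw, ih]
      · simp [pvLoopA, hw, ih]

lemma pv_step_pos (k : Int) : 1 ≤ (max k 1).toNat := by
  have h : (1 : Int) ≤ max k 1 := le_max_right k 1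
  omega

lemma pv_step_cast (k : Int) : ((max k 1).toNat : Int) = max k 1 := by
  have h : (1 : Int) ≤ max k 1 := le_max_right k 1
  omega

-- main invariant: A's loop from a partial chunk shorter than the step equals B's slicing loop
-- on (chunk ++ ws), for any list of nonempty words
lemma pvLoopA_eq_pvLoopB (k : Int) (ws : List String) :
    ∀ chunk : List String, (∀ w ∈ ws, w ≠ "") → chunk.length < (max k 1).toNat →
      pvLoopA k ws chunk = pvLoopB k (max k 1).toNat (chunk ++ ws) := by
  induction ws with
  | nil =>
      intro chunk _ hlen
      match chunk with
      | [] => simp [pvLoopA, pvLoopB_nil]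
      | c :: cs =>
          rw [pvLoopA, List.append_nil, pvLoopB_cons]
          have htake : (c :: cs).take (max k 1).toNat = c :: cs :=
            List.take_of_length_le (le_of_lt hlen)
          have hdrop : cs.drop ((max k 1).toNat - 1) = [] := by
            apply List.drop_eq_nil_of_le
            simp only [List.length_cons] at hlen; omega
          rw [htake, hdrop, pvLoopB_nil]
          have hcond : ¬ (((c :: cs).length : Int) ≥ k) := by
            have hcast := pv_step_cast k
            have h2 : ((c :: cs).length : Int) < ((max k 1).toNat : Int) := by exact_mod_cast hlen
            rcases le_total k 1 with hk | hk
            · have hm : max k 1 = 1 := max_eq_right hk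
              simp only [List.length_cons] at h2 ⊢
              omega
            · have hm : max k 1 = k := max_eq_left hk
              omega
          rw [if_neg hcond]
          simp
  | cons w ws ih =>
      intro chunk hne hlen
      have hw : w ≠ "" := hne w (List.mem_cons_self ..)
      have hne' : ∀ x ∈ ws, x ≠ "" := fun x hx => hne x (List.mem_cons_of_mem _ hx)
      rw [pvLoopA]
      simp only [hw, if_false]
      have hcast := pv_step_cast k
      have hstep := pv_step_pos k
      by_cases hfull : ((chunk ++ [w]).length : Int) ≥ k
      · -- flush: chunk ++ [w] has exactly stepN elements
        have hlenc : (chunk ++ [w]).length = (max k 1).toNat := by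
          have h1 : (chunk ++ [w]).length ≤ (max k 1).toNat := by
            simp only [List.length_append, List.length_singleton]; omega
          have h2 : ((chunk ++ [w]).length : Int) ≥ k := hfull
          rcases le_total k 1 with hk | hk
          · have : max k 1 = 1 := max_eq_right hk
            simp only [List.length_append, List.length_singleton] at h1 ⊢
            omega
          · have : max k 1 = k := max_eq_left hk
            omega
        simp only [hfull, if_true]
        -- rewrite the B side: chunk ++ w :: ws = (chunk ++ [w]) ++ ws, head group is chunk ++ [w]
        have hsplit : chunk ++ w :: ws = (chunk ++ [w]) ++ ws := by simp
        rw [hsplit]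
        obtain ⟨c, cs, hc⟩ : ∃ c cs, chunk ++ [w] = c :: cs := by
          cases h : chunk ++ [w] with
          | nil => exact absurd h (by simp)
          | cons c cs => exact ⟨c, cs, rfl⟩
        rw [hc, List.cons_append, pvLoopB_cons]
        have htake : ((c :: cs) ++ ws).take (max k 1).toNat = c :: cs :=
          List.take_left' (by rw [← hc, hlenc])
        have hdrop : (cs ++ ws).drop ((max k 1).toNat - 1) = ws := by
          have hcs : cs.length = (max k 1).toNat - 1 := by
            have := hlenc; rw [hc] at this; simp at this; omega
          exact List.drop_left' hcs
        simp only [List.cons_append, htake] at *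
        rw [hdrop]
        have hcond : (((c :: cs)).length : Int) ≥ k := by
          rw [← hc, hlenc, hcast]; exact le_max_left k 1
        simp only [hcond, if_true]
        rw [← hc]
        congr 1
        have := ih [] hne' (by simp only [List.length_nil]; exact hstep)
        simpa using this
      · -- keep accumulating
        simp only [hfull, if_false]
        have hlt : (chunk ++ [w]).length < (max k 1).toNat := by
          simp only [List.length_append, List.length_singleton]
          push Not at hfull
          rcases le_total k 1 with hk | hk
          · exfalso
            have : ((chunk ++ [w]).length : Int) ≥ 1 := by
              simp only [List.length_append, List.length_singleton]; omega
            omega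
          · have : max k 1 = k := max_eq_left hk
            simp only [List.length_append, List.length_singleton] at hfull
            omega
        have := ih (chunk ++ [w]) hne' hlt
        rw [this]
        congr 1
        simp

-- ===== VERDICT (by name: the statement is the Claim_ definition above) =====
theorem stream_explanation_words_spec : Claim_equal_stream_explanation_words := by
  intro text k _
  unfold Spec_stream_explanation_words stream_explanation_words stream_explanation_words_alt
  rw [pvLoopA_filter]
  rw [pvLoopA_eq_pvLoopB]
  · rfl
  · intro w hw
    simp only [List.mem_filter, bne_iff_ne, ne_eq] at hw
    exact hw.2
  · simp only [List.length_nil]; exact pv_step_pos k
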